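-- pv_equiv track=rewrite | github.com/FlyingFrares/pedalbus | src/local_search.py | arch_to_path
-- ===== SOURCE A (Python) =====
-- def arch_to_path(edges):
--     paths = []
--     path = []
--
--     for edge in edges:
--         if edge[0] == 0:
--             if path:
--                 paths.append(path)
--             path = [edge]
--         else:
--             path.append(edge)
--
--     if path:
--         paths.append(path)
--
--     return paths
-- ===== SOURCE B (Python) =====
-- def arch_to_path(edges):
--     if not edges:
--         return []
--     seg = [edges[0]]
--     for e in edges[1:]:
--         if e[0] == 0:
--             break
--         seg.append(e)
--     return [seg] + arch_to_path(edges[len(seg):])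
-- ===== Notes on version B (the rewrite author's own statement) =====
-- stated objective: alternative
-- what changed: B is a head-splitting recursion: it peels off the leading path (the first edge plus the following run of non-zero-headed edges) and recurses on the remainder, instead of A's single stateful forward pass with an open-path accumulator flushed at boundaries and at the end.
import Mathlib
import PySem

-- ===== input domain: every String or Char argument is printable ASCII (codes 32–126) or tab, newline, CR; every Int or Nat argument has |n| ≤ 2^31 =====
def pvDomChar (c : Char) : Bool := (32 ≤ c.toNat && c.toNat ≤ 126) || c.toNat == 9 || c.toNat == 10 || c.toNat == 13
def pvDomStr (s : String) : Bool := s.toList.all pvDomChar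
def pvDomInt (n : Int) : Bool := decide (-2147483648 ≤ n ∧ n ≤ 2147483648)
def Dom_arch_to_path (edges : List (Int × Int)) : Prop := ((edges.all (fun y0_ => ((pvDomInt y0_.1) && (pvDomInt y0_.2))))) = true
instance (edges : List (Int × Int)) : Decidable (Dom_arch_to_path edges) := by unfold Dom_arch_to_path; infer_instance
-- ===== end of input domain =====

-- B replaces A's stateful single-pass accumulator with a head-splitting recursion (peel the leading path, recurse on the rest); equivalence of return values proved below.


-- ===== PORT A =====
-- forward loop body: flush the open path at each head-0 edge, else extend it
def pvStepA (st : List (List (Int × Int)) × List (Int × Int)) (edge : Int × Int) :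
    List (List (Int × Int)) × List (Int × Int) :=
  if edge.1 == 0 then
    ((if !st.2.isEmpty then st.1 ++ [st.2] else st.1), [edge])
  else
    (st.1, st.2 ++ [edge])

def arch_to_path (edges : List (Int × Int)) : List (List (Int × Int)) :=
  let st := edges.foldl pvStepA ([], [])
  if !st.2.isEmpty then st.1 ++ [st.2] else st.1

-- ===== PORT B =====
-- head-splitting recursion: the leading path is the first edge plus the run of
-- non-zero-headed edges after it (the Python for-loop with break = takeWhile);
-- edges[len(seg):] then drops exactly that run from the tail (= dropWhile).
def arch_to_path_alt (edges : List (Int × Int)) : List (List (Int × Int)) :=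
  match edges with
  | [] => []
  | e :: es =>
    (e :: es.takeWhile (fun x => !(x.1 == 0))) ::
      arch_to_path_alt (es.dropWhile (fun x => !(x.1 == 0)))
termination_by edges.length
decreasing_by
  have := List.length_dropWhile_le (fun x : Int × Int => !(x.1 == 0)) es
  simp
  omega

-- ===== PRECONDITION & SPEC =====
def Spec_arch_to_path (edges : List (Int × Int)) (out : List (List (Int × Int))) : Prop := out = arch_to_path_alt edges
instance (edges : List (Int × Int)) (out : List (List (Int × Int))) : Decidable (Spec_arch_to_path edges out) := by unfold Spec_arch_to_path; infer_instance

-- ===== CLAIM (what is proved, stated in full; the proofs are below) =====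
def Claim_equal_arch_to_path : Prop := ∀ (edges : List (Int × Int)), Dom_arch_to_path edges → Spec_arch_to_path edges (arch_to_path edges)

-- ===== LEMMAS AND PROOFS =====

def pvFinA (st : List (List (Int × Int)) × List (Int × Int)) : List (List (Int × Int)) :=
  if !st.2.isEmpty then st.1 ++ [st.2] else st.1

-- accumulated closed paths are only ever appended to
theorem pvFinA_prefix (es : List (Int × Int)) :
    ∀ (ps : List (List (Int × Int))) (p : List (Int × Int)),
    pvFinA (es.foldl pvStepA (ps, p)) = ps ++ pvFinA (es.foldl pvStepA ([], p)) := by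
  induction es with
  | nil =>
    intro ps p
    simp only [List.foldl, pvFinA]
    by_cases h : p.isEmpty <;> simp [h]
  | cons e es ih =>
    intro ps p
    by_cases h : e.1 == 0 <;> by_cases h2 : p.isEmpty <;>
      simp only [List.foldl, pvStepA, h, h2, Bool.not_true, Bool.not_false,
        Bool.false_eq_true, reduceIte] <;>
      (rw [ih]; try simp); (rw [ih [p] [e]]; simp)

-- key invariant: finishing A's fold from a nonempty open path p yields p glued to
-- the leading run, followed by B on the remainder
theorem pvAB (es : List (Int × Int)) :
    ∀ (p : List (Int × Int)), p ≠ [] →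
    pvFinA (es.foldl pvStepA ([], p)) =
      (p ++ es.takeWhile (fun x => !(x.1 == 0))) ::
        arch_to_path_alt (es.dropWhile (fun x => !(x.1 == 0))) := by
  induction es with
  | nil =>
    intro p hp
    simp [pvFinA, hp, arch_to_path_alt]
  | cons e es ih =>
    intro p hp
    by_cases h : e.1 == 0
    · simp only [List.foldl, pvStepA, h, if_true,
        List.takeWhile_cons, List.dropWhile_cons, Bool.not_eq_true']
      rw [pvFinA_prefix, ih [e] (by simp)]
      simp [hp, arch_to_path_alt]
    · simp only [List.foldl, pvStepA, h, Bool.false_eq_true, if_false,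
        List.takeWhile_cons, List.dropWhile_cons]
      rw [ih (p ++ [e]) (by simp)]
      simp

-- ===== VERDICT (by name: the statement is the Claim_ definition above) =====
theorem arch_to_path_spec : Claim_equal_arch_to_path := by
  intro edges _
  unfold Spec_arch_to_path arch_to_path
  match edges with
  | [] => simp [arch_to_path_alt]
  | e :: es =>
    show pvFinA ((e :: es).foldl pvStepA ([], [])) = _
    have hstep : (e :: es).foldl pvStepA ([], []) = es.foldl pvStepA ([], [e]) := by
      by_cases h : e.1 == 0 <;> simp [List.foldl, pvStepA, h]
    rw [hstep, pvAB es [e] (by simp)]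
    simp [arch_to_path_alt]
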